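-- pv_equiv track=rewrite | github.com/solashirai/WWW-EvCBR | experiments/run_evcbr_test.py | rank_predictions
-- ===== SOURCE A (Python) =====
-- from typing import Tuple, List
--
-- def rank_predictions(target_truth, all_true, predictions, max_rank) -> Tuple[int, bool]:
--     rank = 1
--     found_target = False
--     for ind, (res, _) in enumerate(predictions):
--         if res == target_truth:
--             found_target = True
--             break
--         elif res in all_true:
--             # filter, don't penalize for highly ranking a different true statements
--             continue
--         else:
--             rank += 1
--     if not found_target:
--         rank = max_rank
--     return rank
-- ===== SOURCE B (Python) =====
-- def rank_predictions(target_truth, all_true, predictions, max_rank):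
--     # Phase 1: locate the first prediction equal to the target.
--     target_index = None
--     for i, (res, _) in enumerate(predictions):
--         if res == target_truth:
--             target_index = i
--             break
--     if target_index is None:
--         return max_rank
--     # Phase 2: count non-true entries strictly before the target.
--     count = 0
--     for res, _ in predictions[:target_index]:
--         if res not in all_true:
--             count += 1
--     return count + 1
-- ===== Notes on version B (the rewrite author's own statement) =====
-- stated objective: alternative
-- what changed: Replaces A's single fused loop with mixed break/continue/accumulator state by a two-phase decomposition: first locate the index of the target, then count non-true entries in the prefix before it.
import Mathlib
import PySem

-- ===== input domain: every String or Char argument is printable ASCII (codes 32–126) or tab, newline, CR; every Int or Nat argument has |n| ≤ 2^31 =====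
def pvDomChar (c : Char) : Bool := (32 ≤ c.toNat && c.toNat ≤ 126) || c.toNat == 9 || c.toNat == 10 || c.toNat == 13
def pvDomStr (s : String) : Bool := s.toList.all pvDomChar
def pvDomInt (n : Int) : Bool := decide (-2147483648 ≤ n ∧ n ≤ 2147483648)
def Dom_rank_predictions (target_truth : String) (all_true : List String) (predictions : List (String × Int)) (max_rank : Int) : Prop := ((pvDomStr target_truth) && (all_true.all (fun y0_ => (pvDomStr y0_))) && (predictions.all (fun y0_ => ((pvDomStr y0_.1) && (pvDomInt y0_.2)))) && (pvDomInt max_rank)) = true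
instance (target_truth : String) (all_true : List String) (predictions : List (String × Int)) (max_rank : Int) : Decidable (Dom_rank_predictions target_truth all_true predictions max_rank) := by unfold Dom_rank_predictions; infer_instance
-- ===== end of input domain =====

-- B changes the decomposition only: a two-phase locate-then-count instead of A's fused loop; same cost (objective: alternative).

-- ===== PORT A =====
-- A's single loop: carries rank and found_target, breaks at the target, skips entries in all_true, else rank += 1.
def rankLoopA (target_truth : String) (all_true : List String) (max_rank : Int) : List (String × Int) → Int → Int
  | [], _ => max_rank            -- loop ended, found_target is False: rank = max_rank
  | (res, _) :: rest, rank =>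
      if res = target_truth then rank
      else if res ∈ all_true then rankLoopA target_truth all_true max_rank rest rank
      else rankLoopA target_truth all_true max_rank rest (rank + 1)

def rank_predictions (target_truth : String) (all_true : List String) (predictions : List (String × Int)) (max_rank : Int) : Int :=
  rankLoopA target_truth all_true max_rank predictions 1

-- ===== PORT B =====
-- Phase 1 of Source B: enumerate-style scan returning the index of the first entry equal to the target.
def findTargetIdx (target_truth : String) : List (String × Int) → Nat → Option Nat
  | [], _ => none
  | (res, _) :: rest, i => if res = target_truth then some i else findTargetIdx target_truth rest (i + 1)

-- Phase 2 of Source B: count entries of the prefix whose res is not in all_true.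
def countNotTrue (all_true : List String) : List (String × Int) → Int → Int
  | [], count => count
  | (res, _) :: rest, count => countNotTrue all_true rest (if res ∈ all_true then count else count + 1)

def rank_predictions_alt (target_truth : String) (all_true : List String) (predictions : List (String × Int)) (max_rank : Int) : Int :=
  match findTargetIdx target_truth predictions 0 with
  | none => max_rank
  | some i => countNotTrue all_true (predictions.take i) 0 + 1

-- ===== PRECONDITION & SPEC =====
def Spec_rank_predictions (target_truth : String) (all_true : List String) (predictions : List (String × Int)) (max_rank : Int) (out : Int) : Prop := out = rank_predictions_alt target_truth all_true predictions max_rank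
instance (target_truth : String) (all_true : List String) (predictions : List (String × Int)) (max_rank : Int) (out : Int) : Decidable (Spec_rank_predictions target_truth all_true predictions max_rank out) := by unfold Spec_rank_predictions; infer_instance

-- ===== CLAIM (what is proved, stated in full; the proofs are below) =====
def Claim_equal_rank_predictions : Prop := ∀ (target_truth : String) (all_true : List String) (predictions : List (String × Int)) (max_rank : Int), Dom_rank_predictions target_truth all_true predictions max_rank → Spec_rank_predictions target_truth all_true predictions max_rank (rank_predictions target_truth all_true predictions max_rank)

-- ===== LEMMAS AND PROOFS =====

-- the accumulator of findTargetIdx only shifts the result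
theorem findTargetIdx_shift (t : String) (l : List (String × Int)) (i : Nat) :
    findTargetIdx t l i = (findTargetIdx t l 0).map (· + i) := by
  induction l generalizing i with
  | nil => simp [findTargetIdx]
  | cons p rest ih =>
    obtain ⟨res, v⟩ := p
    by_cases h : res = t
    · simp [findTargetIdx, h]
    · rw [findTargetIdx, findTargetIdx, if_neg h, if_neg h, ih (i + 1), ih 1]
      cases findTargetIdx t rest 0 <;> simp <;> omega

theorem countNotTrue_shift (a : List String) (l : List (String × Int)) (c : Int) :
    countNotTrue a l c = c + countNotTrue a l 0 := by
  induction l generalizing c with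
  | nil => simp [countNotTrue]
  | cons p rest ih =>
    obtain ⟨res, v⟩ := p
    by_cases h : res ∈ a
    · rw [countNotTrue, countNotTrue, if_pos h, if_pos h]; exact ih c
    · rw [countNotTrue, countNotTrue, if_neg h, if_neg h, ih (c + 1), ih (0 + 1)]
      omega

theorem rankLoopA_eq (t : String) (a : List String) (m : Int) (l : List (String × Int)) (rank : Int) :
    rankLoopA t a m l rank =
      match findTargetIdx t l 0 with
      | none => m
      | some i => rank + countNotTrue a (l.take i) 0 := by
  induction l generalizing rank with
  | nil => simp [rankLoopA, findTargetIdx]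
  | cons p rest ih =>
    obtain ⟨res, v⟩ := p
    by_cases h : res = t
    · simp [rankLoopA, findTargetIdx, h, countNotTrue]
    · rw [rankLoopA, findTargetIdx, if_neg h, if_neg h, findTargetIdx_shift t rest 1]
      by_cases ha : res ∈ a
      · rw [if_pos ha, ih rank]
        cases hf : findTargetIdx t rest 0 with
        | none => simp
        | some j =>
          simp only [Option.map_some]
          rw [List.take_succ_cons, countNotTrue, if_pos ha]
      · rw [if_neg ha, ih (rank + 1)]
        cases hf : findTargetIdx t rest 0 with
        | none => simp
        | some j =>
          simp only [Option.map_some]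
          rw [List.take_succ_cons, countNotTrue, if_neg ha,
              countNotTrue_shift a (rest.take j) (0 + 1)]
          ring

-- ===== VERDICT (by name: the statement is the Claim_ definition above) =====
theorem rank_predictions_spec : Claim_equal_rank_predictions := by
  intro t a preds m _
  unfold Spec_rank_predictions rank_predictions rank_predictions_alt
  rw [rankLoopA_eq]
  cases findTargetIdx t preds 0 with
  | none => rfl
  | some i => exact Int.add_comm 1 _
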